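-- pv_equiv track=rewrite | github.com/xliry/desloppify | desloppify/app/commands/plan/cluster_handlers.py | _sorted_clusters_by_queue_pos
-- ===== SOURCE A (Python) =====
-- def _sorted_clusters_by_queue_pos(
--     clusters: dict, queue_order: list[str],
-- ) -> tuple[list[tuple[str, dict]], dict[str, int]]:
--     """Sort clusters by their earliest member's position in the queue.
--
--     Returns (sorted_cluster_pairs, min_pos_cache) where min_pos_cache maps
--     cluster name to its earliest queue position (999_999 if no members queued).
--     """
--     pos_map = {fid: i for i, fid in enumerate(queue_order)}
--
--     def _min_pos(cluster_data: dict) -> int: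
--         positions = [pos_map[fid] for fid in cluster_data.get("issue_ids", []) if fid in pos_map]
--         return min(positions) if positions else 999_999
--
--     min_pos_cache = {name: _min_pos(c) for name, c in clusters.items()}
--     sorted_clusters = sorted(clusters.items(), key=lambda kv: min_pos_cache[kv[0]])
--     return sorted_clusters, min_pos_cache
-- ===== SOURCE B (Python) =====
-- def _sorted_clusters_by_queue_pos(
--     clusters: dict, queue_order: list[str],
-- ) -> tuple[list[tuple[str, dict]], dict[str, int]]:
--     """Sort clusters by their earliest member's position in the queue.
--
--     Inverted-index version: instead of scanning pos_map once per cluster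
--     member, build fid -> [cluster names] once, then sweep pos_map a single
--     time, pushing each position down into the clusters that contain the fid.
--     """
--     pos_map = {fid: i for i, fid in enumerate(queue_order)}
--
--     fid_to_clusters: dict = {}
--     for name, c in clusters.items():
--         for fid in c.get("issue_ids", []):
--             fid_to_clusters.setdefault(fid, []).append(name)
--
--     best: dict = {}
--     for fid, pos in pos_map.items():
--         for name in fid_to_clusters.get(fid, []):
--             cur = best.get(name)
--             if cur is None or pos < cur:
--                 best[name] = pos
--
--     min_pos_cache = {name: best.get(name, 999_999) for name in clusters}
--     sorted_clusters = sorted(clusters.items(), key=lambda kv: min_pos_cache[kv[0]])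
--     return sorted_clusters, min_pos_cache
-- ===== Notes on version B (the rewrite author's own statement) =====
-- stated objective: alternative
-- what changed: Replaces A's per-cluster scan of its own members (pos_map lookup per member, then min) with an inverted index fid->cluster-names built once, a running-minimum dict filled by a single sweep over pos_map.items(), and a final fill-in of the 999_999 default; Pre_ only requires distinct cluster names, which every Python dict input satisfies.
import Mathlib
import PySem

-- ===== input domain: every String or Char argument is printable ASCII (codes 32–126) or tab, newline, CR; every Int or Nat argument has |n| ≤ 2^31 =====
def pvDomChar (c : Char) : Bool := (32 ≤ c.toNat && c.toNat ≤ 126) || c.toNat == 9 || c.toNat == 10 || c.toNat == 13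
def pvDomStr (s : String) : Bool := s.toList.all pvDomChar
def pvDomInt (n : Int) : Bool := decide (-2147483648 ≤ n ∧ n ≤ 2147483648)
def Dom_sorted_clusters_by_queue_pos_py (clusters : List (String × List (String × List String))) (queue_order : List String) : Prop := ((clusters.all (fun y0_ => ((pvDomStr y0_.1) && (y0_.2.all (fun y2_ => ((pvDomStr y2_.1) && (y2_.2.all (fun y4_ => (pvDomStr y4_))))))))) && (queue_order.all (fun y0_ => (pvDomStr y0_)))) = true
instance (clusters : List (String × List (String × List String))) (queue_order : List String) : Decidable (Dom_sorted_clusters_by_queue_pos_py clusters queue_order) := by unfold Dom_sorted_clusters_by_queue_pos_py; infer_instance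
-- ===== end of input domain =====

-- B replaces A's per-cluster scan of its members by an inverted index fid → cluster names
-- plus one sweep over pos_map pushing each position into its clusters (objective: alternative).

-- pos_map = {fid: i for i, fid in enumerate(queue_order)}  (both versions compute this identically)
def pvPosMap (queue_order : List String) : PySem.Dict String Int :=
  (PySem.List.enumerate queue_order 0).foldl (fun d p => d.insert p.2 p.1) PySem.Dict.empty

-- cluster_data.get("issue_ids", []): first-match association-list lookup = Python dict .get
def pvIssueIds (c : List (String × List String)) : List String :=
  (List.lookup "issue_ids" c).getD []

-- ===== PORT A =====
-- positions = [pos_map[fid] for fid in ids if fid in pos_map]; min(positions) if positions else 999_999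
-- (min? = none exactly when positions is empty, so the match is Python's emptiness test)
def pvMinPosA (pos_map : PySem.Dict String Int) (c : List (String × List String)) : Int :=
  let positions := (pvIssueIds c).filterMap (fun fid => pos_map.get? fid)
  match PySem.List.min? positions (fun x => x) with
  | some m => m
  | none => 999999

-- min_pos_cache = {name: _min_pos(c) for name, c in clusters.items()}
def pvCacheA (clusters : List (String × List (String × List String))) (queue_order : List String) : PySem.Dict String Int :=
  clusters.foldl (fun d nc => d.insert nc.1 (pvMinPosA (pvPosMap queue_order) nc.2)) PySem.Dict.empty

def sorted_clusters_by_queue_pos_py (clusters : List (String × List (String × List String))) (queue_order : List String) : (List (String × (List (String × List String)))) × (List (String × Int)) :=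
  let cache := pvCacheA clusters queue_order
  -- min_pos_cache[kv[0]] never raises (every cluster name was inserted), so getD is exact here
  (PySem.List.sorted clusters (fun kv => cache.getD kv.1 0) false, cache.items)

-- ===== PORT B =====
-- fid_to_clusters: for name, c: for fid in ids: setdefault(fid, []).append(name)
def pvF2C (clusters : List (String × List (String × List String))) : PySem.Dict String (List String) :=
  clusters.foldl (fun d nc =>
      (pvIssueIds nc.2).foldl (fun d fid => d.insert fid (d.getD fid [] ++ [nc.1])) d)
    PySem.Dict.empty

-- cur = best.get(name); if cur is None or pos < cur: best[name] = pos
def pvBestStep (pos : Int) (b : PySem.Dict String Int) (name : String) : PySem.Dict String Int :=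
  match b.get? name with
  | none => b.insert name pos
  | some cur => if pos < cur then b.insert name pos else b

-- for fid, pos in pos_map.items(): for name in fid_to_clusters.get(fid, []): ...
def pvBest (f2c : PySem.Dict String (List String)) (pos_map : PySem.Dict String Int) : PySem.Dict String Int :=
  pos_map.items.foldl (fun b fp => (f2c.getD fp.1 []).foldl (pvBestStep fp.2) b) PySem.Dict.empty

-- min_pos_cache = {name: best.get(name, 999_999) for name in clusters}
def pvCacheB (clusters : List (String × List (String × List String))) (queue_order : List String) : PySem.Dict String Int :=
  clusters.foldl (fun d nc => d.insert nc.1 ((pvBest (pvF2C clusters) (pvPosMap queue_order)).getD nc.1 999999)) PySem.Dict.empty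

def sorted_clusters_by_queue_pos_py_alt (clusters : List (String × List (String × List String))) (queue_order : List String) : (List (String × (List (String × List String)))) × (List (String × Int)) :=
  let cache := pvCacheB clusters queue_order
  (PySem.List.sorted clusters (fun kv => cache.getD kv.1 0) false, cache.items)

-- ===== PRECONDITION & SPEC =====
-- Pre_ only requires the cluster names to be pairwise distinct: the Python argument
-- `clusters` is a dict, whose keys cannot repeat, so every Python input satisfies it.
def Pre_sorted_clusters_by_queue_pos_py (clusters : List (String × List (String × List String))) (queue_order : List String) : Prop :=
  (clusters.map Prod.fst).Nodup
instance (clusters : List (String × List (String × List String))) (queue_order : List String) : Decidable (Pre_sorted_clusters_by_queue_pos_py clusters queue_order) := by unfold Pre_sorted_clusters_by_queue_pos_py; infer_instance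

def pvWitness_sorted_clusters_by_queue_pos_py : (List (String × List (String × List String))) × List String :=
  ([("c0", [("issue_ids", ["a", "b"])]), ("c1", [])], ["b", "a"])

def Spec_sorted_clusters_by_queue_pos_py (clusters : List (String × List (String × List String))) (queue_order : List String) (out : (List (String × (List (String × List String)))) × (List (String × Int))) : Prop := out = sorted_clusters_by_queue_pos_py_alt clusters queue_order
instance (clusters : List (String × List (String × List String))) (queue_order : List String) (out : (List (String × (List (String × List String)))) × (List (String × Int))) : Decidable (Spec_sorted_clusters_by_queue_pos_py clusters queue_order out) := by unfold Spec_sorted_clusters_by_queue_pos_py; infer_instance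

-- ===== CLAIM (what is proved, stated in full; the proofs are below) =====
def Claim_equal_sorted_clusters_by_queue_pos_py : Prop := ∀ (clusters : List (String × List (String × List String))) (queue_order : List String), Dom_sorted_clusters_by_queue_pos_py clusters queue_order → Pre_sorted_clusters_by_queue_pos_py clusters queue_order → Spec_sorted_clusters_by_queue_pos_py clusters queue_order (sorted_clusters_by_queue_pos_py clusters queue_order)

-- ===== LEMMAS AND PROOFS =====

-- running minimum as an Option (none = "no position seen yet")
def pvOmin (o : Option Int) (p : Int) : Option Int :=
  match o with
  | none => some p
  | some a => some (min a p)

theorem pvOmin_idem (o : Option Int) (p : Int) : pvOmin (pvOmin o p) p = pvOmin o p := by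
  cases o <;> simp [pvOmin]

theorem pvBestStep_get? (pos : Int) (b : PySem.Dict String Int) (n name : String) :
    (pvBestStep pos b n).get? name = if name = n then pvOmin (b.get? name) pos else b.get? name := by
  unfold pvBestStep
  cases hb : b.get? n with
  | none =>
    rw [PySem.Dict.get?_insert]
    by_cases h : name = n <;> simp [h, pvOmin, hb]
  | some cur =>
    by_cases hlt : pos < cur
    · simp only [hlt, if_true]
      rw [PySem.Dict.get?_insert]
      by_cases h : name = n <;> simp [h, pvOmin, hb] <;> omega
    · simp only [hlt, if_false]
      by_cases h : name = n <;> simp [h, pvOmin, hb] <;> omega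

theorem pv_inner_get? (names : List String) (pos : Int) (b : PySem.Dict String Int) (name : String) :
    (names.foldl (pvBestStep pos) b).get? name
      = if name ∈ names then pvOmin (b.get? name) pos else b.get? name := by
  induction names generalizing b with
  | nil => simp
  | cons n t ih =>
    simp only [List.foldl_cons, ih, pvBestStep_get?, List.mem_cons]
    by_cases h : name = n
    · subst h
      by_cases ht : name ∈ t <;> simp [ht, pvOmin_idem]
    · simp [h]

theorem pv_outer_get? (f2c : PySem.Dict String (List String)) (items : List (String × Int))
    (b : PySem.Dict String Int) (name : String) :
    (items.foldl (fun b fp => (f2c.getD fp.1 []).foldl (pvBestStep fp.2) b) b).get? name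
      = items.foldl (fun acc fp => if name ∈ f2c.getD fp.1 [] then pvOmin acc fp.2 else acc) (b.get? name) := by
  induction items generalizing b with
  | nil => simp
  | cons fp t ih =>
    simp only [List.foldl_cons, ih, pv_inner_get?]

theorem pv_fold_filterMap (l : List (String × Int)) (P : String × Int → Prop) [DecidablePred P]
    (acc : Option Int) :
    l.foldl (fun acc fp => if P fp then pvOmin acc fp.2 else acc) acc
      = (l.filterMap (fun fp => if P fp then some fp.2 else none)).foldl pvOmin acc := by
  induction l generalizing acc with
  | nil => simp
  | cons fp t ih =>
    by_cases h : P fp <;> simp [h, ih]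

theorem pv_foldl_pvOmin_some (t : List Int) (a : Int) :
    t.foldl pvOmin (some a) = some (t.foldl min a) := by
  induction t generalizing a with
  | nil => simp
  | cons x t ih => simp [pvOmin, ih]

theorem pv_foldl_pvOmin_min? (ps : List Int) :
    ps.foldl pvOmin none = PySem.List.min? ps (fun x => x) := by
  cases ps with
  | nil => simp [PySem.List.min?]
  | cons x t =>
    rw [PySem.List.min?_id_cons]
    simp [pvOmin, pv_foldl_pvOmin_some]

theorem pv_min?_congr (xs ys : List Int) (h : ∀ x, x ∈ xs ↔ x ∈ ys) :
    PySem.List.min? xs (fun x => x) = PySem.List.min? ys (fun x => x) := by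
  cases hx : PySem.List.min? xs (fun x => x) with
  | none =>
    rw [PySem.List.min?_eq_none_iff] at hx
    subst hx
    cases hy : PySem.List.min? ys (fun x => x) with
    | none => rfl
    | some m =>
      have hm := PySem.List.min?_mem hy
      rw [← h] at hm
      simp at hm
  | some m =>
    have hm := PySem.List.min?_mem hx
    have hmin := PySem.List.min?_isMin hx
    cases hy : PySem.List.min? ys (fun x => x) with
    | none =>
      rw [PySem.List.min?_eq_none_iff] at hy
      subst hy
      rw [h] at hm
      simp at hm
    | some m' =>
      have hm' := PySem.List.min?_mem hy
      have hmin' := PySem.List.min?_isMin hy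
      have h1 : m ≤ m' := hmin m' ((h m').mpr hm')
      have h2 : m' ≤ m := hmin' m ((h m).mp hm)
      exact congrArg some (le_antisymm h1 h2)

theorem pv_f2c_inner_mem (idsl : List String) (n : String) (d : PySem.Dict String (List String))
    (fid name : String) :
    name ∈ (idsl.foldl (fun d f => d.insert f (d.getD f [] ++ [n])) d).getD fid []
      ↔ name ∈ d.getD fid [] ∨ (fid ∈ idsl ∧ name = n) := by
  induction idsl generalizing d with
  | nil => simp
  | cons f t ih =>
    simp only [List.foldl_cons, ih, PySem.Dict.getD_insert, List.mem_cons]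
    by_cases hf : fid = f <;> simp [hf] <;> tauto

theorem pv_f2c_mem (clusters : List (String × List (String × List String))) (fid name : String) :
    name ∈ (pvF2C clusters).getD fid []
      ↔ ∃ c, (name, c) ∈ clusters ∧ fid ∈ pvIssueIds c := by
  unfold pvF2C
  have main : ∀ (l : List (String × List (String × List String))) (d : PySem.Dict String (List String)),
      name ∈ (l.foldl (fun d nc => (pvIssueIds nc.2).foldl (fun d f => d.insert f (d.getD f [] ++ [nc.1])) d) d).getD fid []
        ↔ name ∈ d.getD fid [] ∨ ∃ c, (name, c) ∈ l ∧ fid ∈ pvIssueIds c := by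
    intro l
    induction l with
    | nil => simp
    | cons nc t ih =>
      intro d
      simp only [List.foldl_cons, ih, pv_f2c_inner_mem, List.mem_cons]
      constructor
      · rintro ((h | ⟨hf, rfl⟩) | ⟨c, hc, hfc⟩)
        · exact Or.inl h
        · exact Or.inr ⟨nc.2, Or.inl rfl, hf⟩
        · exact Or.inr ⟨c, Or.inr hc, hfc⟩
      · rintro (h | ⟨c, (hc | hc), hfc⟩)
        · exact Or.inl (Or.inl h)
        · rcases hc with rfl
          exact Or.inl (Or.inr ⟨hfc, rfl⟩)
        · exact Or.inr ⟨c, hc, hfc⟩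
  rw [main]
  simp

theorem pv_posMap_keys_nodup (queue_order : List String) : (pvPosMap queue_order).keys.Nodup := by
  unfold pvPosMap
  exact PySem.Dict.nodup_keys_foldl_insert_key (PySem.List.enumerate queue_order 0)
    (fun (p : Int × String) => p.2) (fun _ p => p.1) PySem.Dict.empty
    (by simp [PySem.Dict.keys_empty])

theorem pv_posMap_items_iff (queue_order : List String) (fid : String) (x : Int) :
    (fid, x) ∈ (pvPosMap queue_order).items ↔ (pvPosMap queue_order).get? fid = some x := by
  constructor
  · intro h
    exact PySem.Dict.get?_of_mem_items _ h (pv_posMap_keys_nodup queue_order)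
  · intro h
    exact PySem.Dict.mem_items_of_get?_eq_some _ h

theorem pv_nodup_fst_inj {α β : Type} (l : List (α × β)) (h : (l.map Prod.fst).Nodup)
    {a : α} {b b' : β} (h1 : (a, b) ∈ l) (h2 : (a, b') ∈ l) : b = b' := by
  induction l with
  | nil => simp at h1
  | cons p t ih =>
    rw [List.map_cons, List.nodup_cons] at h
    rcases List.mem_cons.mp h1 with h1' | h1'
    · rcases List.mem_cons.mp h2 with h2' | h2'
      · rw [← h1'] at h2'
        injection h2' with hx hy
        exact hy.symm
      · exfalso
        apply h.1
        rw [← h1']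
        exact List.mem_map.mpr ⟨(a, b'), h2', rfl⟩
    · rcases List.mem_cons.mp h2 with h2' | h2'
      · exfalso
        apply h.1
        rw [← h2']
        exact List.mem_map.mpr ⟨(a, b), h1', rfl⟩
      · exact ih h.2 h1' h2'

theorem pv_core (clusters : List (String × List (String × List String))) (queue_order : List String)
    (hpre : (clusters.map Prod.fst).Nodup)
    {name : String} {c : List (String × List String)} (hmem : (name, c) ∈ clusters) :
    (pvBest (pvF2C clusters) (pvPosMap queue_order)).getD name 999999
      = pvMinPosA (pvPosMap queue_order) c := by
  have hmemiff : ∀ x : Int,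
      x ∈ (pvPosMap queue_order).items.filterMap
            (fun fp => if name ∈ (pvF2C clusters).getD fp.1 [] then some fp.2 else none)
        ↔ x ∈ (pvIssueIds c).filterMap (fun fid => (pvPosMap queue_order).get? fid) := by
    intro x
    simp only [List.mem_filterMap]
    constructor
    · rintro ⟨⟨fid, p⟩, hin, hif⟩
      by_cases hn : name ∈ (pvF2C clusters).getD fid []
      · rw [if_pos hn] at hif
        obtain ⟨c', hc', hfid⟩ := (pv_f2c_mem clusters fid name).mp hn
        have hcc : c' = c := pv_nodup_fst_inj clusters hpre hc' hmem
        subst hcc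
        refine ⟨fid, hfid, ?_⟩
        have := (pv_posMap_items_iff queue_order fid p).mp hin
        rw [this]
        exact hif
      · rw [if_neg hn] at hif
        cases hif
    · rintro ⟨fid, hfid, hget⟩
      refine ⟨(fid, x), (pv_posMap_items_iff queue_order fid x).mpr hget, ?_⟩
      rw [if_pos ((pv_f2c_mem clusters fid name).mpr ⟨c, hmem, hfid⟩)]
  unfold pvBest
  rw [PySem.Dict.getD_eq_get?_getD, pv_outer_get?]
  simp only [PySem.Dict.get?_empty]
  rw [pv_fold_filterMap _ (fun fp => name ∈ (pvF2C clusters).getD fp.1 [])]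
  rw [pv_foldl_pvOmin_min?]
  rw [pv_min?_congr _ _ hmemiff]
  cases hq : PySem.List.min? ((pvIssueIds c).filterMap fun fid => (pvPosMap queue_order).get? fid) (fun x => x) <;>
    simp [pvMinPosA, hq]

theorem pv_cache_eq (clusters : List (String × List (String × List String))) (queue_order : List String)
    (hpre : (clusters.map Prod.fst).Nodup) :
    pvCacheA clusters queue_order = pvCacheB clusters queue_order := by
  unfold pvCacheA pvCacheB
  apply PySem.List.foldl_congr_mem
  intro acc nc hnc
  rw [pv_core clusters queue_order hpre (name := nc.1) (c := nc.2) (by simpa using hnc)]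

-- ===== VERDICT (by name: the statement is the Claim_ definition above) =====
theorem sorted_clusters_by_queue_pos_py_spec : Claim_equal_sorted_clusters_by_queue_pos_py := by
  intro clusters queue_order _ hpre
  unfold Spec_sorted_clusters_by_queue_pos_py
  unfold sorted_clusters_by_queue_pos_py sorted_clusters_by_queue_pos_py_alt
  rw [pv_cache_eq clusters queue_order hpre]
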